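-- pv_equiv track=rewrite | github.com/rememberyourwhy/codewars | Not categorized/max_subarray_print.py | second_max_subarray
-- ===== SOURCE A (Python) =====
-- def second_max_subarray(arr, maxSum):
--     secondSum = arr[0]
--     curSum = 0
--     for i in arr:
--         if curSum < 0:
--             curSum = 0
--         curSum += i
--         if maxSum - curSum:
--             secondSum = max(secondSum, curSum)
--     return secondSum
-- ===== SOURCE B (Python) =====
-- def second_max_subarray(arr, maxSum):
--     # staged passes: prefix sums, then running minima, then candidates, then best
--     pref = []
--     run = 0
--     for x in arr:
--         run += x
--         pref.append(run)
--     mins = []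
--     m = 0
--     for p in pref:
--         mins.append(m)
--         m = min(m, p)
--     cands = [p - mn for p, mn in zip(pref, mins)]
--     best = arr[0]
--     for c in cands:
--         if maxSum != c:
--             best = max(best, c)
--     return best
-- ===== Notes on version B (the rewrite author's own statement) =====
-- stated objective: alternative
-- what changed: Replaces Kadane's single reset-when-negative running-sum loop with four staged passes: build the prefix-sum list, build the running-minimum-prefix list, zip them into a candidate list (prefix minus earlier minimum), then take the max of the candidates that differ from maxSum.
import Mathlib
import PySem

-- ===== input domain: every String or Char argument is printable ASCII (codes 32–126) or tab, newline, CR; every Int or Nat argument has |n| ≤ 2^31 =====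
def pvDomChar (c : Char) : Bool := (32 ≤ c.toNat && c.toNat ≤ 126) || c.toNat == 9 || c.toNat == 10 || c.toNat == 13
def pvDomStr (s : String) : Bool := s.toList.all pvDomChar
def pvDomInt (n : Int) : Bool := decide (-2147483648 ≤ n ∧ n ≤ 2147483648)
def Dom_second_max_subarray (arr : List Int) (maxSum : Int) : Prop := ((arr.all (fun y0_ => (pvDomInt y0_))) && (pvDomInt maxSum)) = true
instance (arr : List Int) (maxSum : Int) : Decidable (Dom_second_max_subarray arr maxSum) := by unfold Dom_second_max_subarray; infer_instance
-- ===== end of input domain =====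

-- B replaces Kadane's single reset-when-negative scan with staged passes (prefix sums, running minima, candidates, max); alternative decomposition, same O(n) cost.


-- ===== PORT A =====
-- Kadane-style single fold; state: (secondSum, curSum)
def smsStepA (maxSum : Int) (s : Int × Int) (i : Int) : Int × Int :=
  let cur := (if s.2 < 0 then 0 else s.2) + i
  (if maxSum - cur ≠ 0 then max s.1 cur else s.1, cur)

def second_max_subarray (arr : List Int) (maxSum : Int) : Int :=
  match arr with
  | [] => 0  -- arr[0] raises IndexError; excluded by Pre_
  | a :: _ => (arr.foldl (smsStepA maxSum) (a, 0)).1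

-- ===== PORT B =====
-- pass 1: prefix sums
def smsPref (run : Int) : List Int → List Int
  | [] => []
  | x :: t => (run + x) :: smsPref (run + x) t

-- pass 2: running minimum of the prefixes seen so far (strictly before each position)
def smsMins (m : Int) : List Int → List Int
  | [] => []
  | p :: t => m :: smsMins (min m p) t

def second_max_subarray_alt (arr : List Int) (maxSum : Int) : Int :=
  match arr with
  | [] => 0  -- arr[0] raises IndexError; excluded by Pre_
  | a :: _ =>
    let pref := smsPref 0 arr
    let cands := (pref.zip (smsMins 0 pref)).map (fun pm => pm.1 - pm.2)
    cands.foldl (fun best c => if maxSum ≠ c then max best c else best) a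

-- ===== PRECONDITION & SPEC =====
-- A evaluates arr[0], which raises IndexError on the empty list (B does the same).
def Pre_second_max_subarray (arr : List Int) (maxSum : Int) : Prop := arr ≠ []
instance (arr : List Int) (maxSum : Int) : Decidable (Pre_second_max_subarray arr maxSum) := by unfold Pre_second_max_subarray; infer_instance
def pvWitness_second_max_subarray : List Int × Int := ([1, -2, 3], 3)

def Spec_second_max_subarray (arr : List Int) (maxSum : Int) (out : Int) : Prop := out = second_max_subarray_alt arr maxSum
instance (arr : List Int) (maxSum : Int) (out : Int) : Decidable (Spec_second_max_subarray arr maxSum out) := by unfold Spec_second_max_subarray; infer_instance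

-- ===== CLAIM (what is proved, stated in full; the proofs are below) =====
def Claim_equal_second_max_subarray : Prop := ∀ (arr : List Int) (maxSum : Int), Dom_second_max_subarray arr maxSum → Pre_second_max_subarray arr maxSum → Spec_second_max_subarray arr maxSum (second_max_subarray arr maxSum)

-- ===== LEMMAS AND PROOFS =====

-- Invariant: max cur 0 = p - m links A's running sum to B's prefix/min pair.
theorem sms_loop_eq (maxSum : Int) (l : List Int) : ∀ (s cur p m : Int),
    max cur 0 = p - m →
    (l.foldl (smsStepA maxSum) (s, cur)).1 =
      (((smsPref p l).zip (smsMins m (smsPref p l))).map (fun pm => pm.1 - pm.2)).foldl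
        (fun best c => if maxSum ≠ c then max best c else best) s := by
  induction l with
  | nil => intro s cur p m _; rfl
  | cons x t ih =>
    intro s cur p m h
    simp only [List.foldl_cons, smsStepA, smsPref, smsMins, List.zip_cons_cons, List.map_cons]
    have hcand : (if cur < 0 then 0 else cur) + x = p + x - m := by
      rcases max_cases cur 0 with ⟨h1, h2⟩ | ⟨h1, h2⟩ <;> omega
    rw [hcand]
    have hif : (if maxSum - (p + x - m) ≠ 0 then max s (p + x - m) else s)
        = (if maxSum ≠ p + x - m then max s (p + x - m) else s) := by
      by_cases hc : maxSum = p + x - m <;> simp [hc, sub_eq_zero]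
    rw [hif]
    have hinv : max (p + x - m) 0 = p + x - min m (p + x) := by
      rcases min_cases m (p + x) with ⟨h1, h2⟩ | ⟨h1, h2⟩ <;>
        rcases max_cases (p + x - m) (0 : Int) with ⟨h3, h4⟩ | ⟨h3, h4⟩ <;> omega
    exact ih _ _ _ _ hinv

-- ===== VERDICT (by name: the statement is the Claim_ definition above) =====
theorem second_max_subarray_spec : Claim_equal_second_max_subarray := by
  intro arr maxSum _ hpre
  unfold Spec_second_max_subarray second_max_subarray second_max_subarray_alt
  match arr with
  | [] => exact absurd rfl hpre
  | a :: t => exact sms_loop_eq maxSum (a :: t) a 0 0 0 (by simp)
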